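-- pv_equiv track=rewrite | github.com/andrewsmike/redhdl | redhdl/voxel/region.py | xz_direction_y_rotated
-- ===== SOURCE A (Python) =====
-- from typing import (
--     Any,
--     Literal,
--     NamedTuple,
--     TypeGuard,
--     TypeVar,
--     cast,
--     overload,
-- )
--
-- Direction = Literal["up", "down", "north", "east", "south", "west"]
--
-- def xz_direction_y_rotated(direction: Direction, quarter_turns: int = 1) -> Direction:
--     for _quarter_turn_index in range(quarter_turns):
--         direction = cast(
--             Direction,
--             {
--                 "north": "west",
--                 "west": "south",
--                 "south": "east",
--                 "east": "north",
--             }[direction],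
--         )
--
--     return direction
-- ===== SOURCE B (Python) =====
-- _ORDER = ["north", "west", "south", "east"]
-- _INDEX = {"north": 0, "west": 1, "south": 2, "east": 3}
--
--
-- def xz_direction_y_rotated(direction, quarter_turns=1):
--     if quarter_turns <= 0:
--         return direction
--     return _ORDER[(_INDEX[direction] + quarter_turns) % 4]
-- ===== Notes on version B (the rewrite author's own statement) =====
-- stated objective: faster
-- what changed: Replaces the quarter_turns-iteration loop of dict lookups by a single closed-form modular index into a fixed 4-cycle list.
import Mathlib
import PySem

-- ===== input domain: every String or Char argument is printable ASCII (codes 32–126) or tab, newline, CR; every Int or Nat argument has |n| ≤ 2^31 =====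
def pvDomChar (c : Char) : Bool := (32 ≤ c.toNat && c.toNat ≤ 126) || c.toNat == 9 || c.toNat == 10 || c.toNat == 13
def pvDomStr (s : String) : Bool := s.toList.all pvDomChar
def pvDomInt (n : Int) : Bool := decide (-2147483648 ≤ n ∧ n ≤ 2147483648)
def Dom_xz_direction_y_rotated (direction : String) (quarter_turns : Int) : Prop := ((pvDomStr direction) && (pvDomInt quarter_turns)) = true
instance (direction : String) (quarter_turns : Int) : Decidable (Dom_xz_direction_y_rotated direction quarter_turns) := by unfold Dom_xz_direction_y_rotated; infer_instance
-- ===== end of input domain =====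

-- B replaces A's quarter_turns-step rotation loop by one closed-form modular index into the 4-cycle (faster: O(1) vs O(quarter_turns)).

-- ===== PORT A =====
-- the literal rotation dict of A
def pvRotDict : PySem.Dict String String :=
  PySem.Dict.ofList [("north", "west"), ("west", "south"), ("south", "east"), ("east", "north")]

-- the 'for _ in range(quarter_turns)' loop; lookup failure (KeyError) cannot occur inside Pre_
def pvRotLoop : Nat → String → String
  | 0, d => d
  | n + 1, d => pvRotLoop n ((pvRotDict.get? d).getD d)

def xz_direction_y_rotated (direction : String) (quarter_turns : Int) : String :=
  pvRotLoop quarter_turns.toNat direction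

-- ===== PORT B =====
def pvOrder : List String := ["north", "west", "south", "east"]
def pvIndex : PySem.Dict String Int :=
  PySem.Dict.ofList [("north", 0), ("west", 1), ("south", 2), ("east", 3)]

def xz_direction_y_rotated_alt (direction : String) (quarter_turns : Int) : String :=
  if quarter_turns ≤ 0 then direction
  else (((PySem.List.pyGet? pvOrder (PySem.Int.mod ((pvIndex.getD direction 0) + quarter_turns) 4)).getD ""))

-- ===== PRECONDITION & SPEC =====
-- Pre_ excludes exactly the inputs on which A raises KeyError: at least one turn requested on a
-- string that is not one of the four horizontal directions.
def Pre_xz_direction_y_rotated (direction : String) (quarter_turns : Int) : Prop :=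
  quarter_turns ≤ 0 ∨ direction ∈ ["north", "west", "south", "east"]
instance (direction : String) (quarter_turns : Int) : Decidable (Pre_xz_direction_y_rotated direction quarter_turns) := by unfold Pre_xz_direction_y_rotated; infer_instance

def pvWitness_xz_direction_y_rotated : String × Int := ("north", 3)

def Spec_xz_direction_y_rotated (direction : String) (quarter_turns : Int) (out : String) : Prop := out = xz_direction_y_rotated_alt direction quarter_turns
instance (direction : String) (quarter_turns : Int) (out : String) : Decidable (Spec_xz_direction_y_rotated direction quarter_turns out) := by unfold Spec_xz_direction_y_rotated; infer_instance

-- ===== CLAIM (what is proved, stated in full; the proofs are below) =====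
def Claim_equal_xz_direction_y_rotated : Prop := ∀ (direction : String) (quarter_turns : Int), Dom_xz_direction_y_rotated direction quarter_turns → Pre_xz_direction_y_rotated direction quarter_turns → Spec_xz_direction_y_rotated direction quarter_turns (xz_direction_y_rotated direction quarter_turns)

-- ===== LEMMAS AND PROOFS =====

-- one full cycle of the loop is the identity on the four directions
theorem pvRotLoop_period (n : Nat) (d : String) (hd : d ∈ pvOrder) :
    pvRotLoop (n + 4) d = pvRotLoop n d := by
  fin_cases hd <;> rfl

theorem pvRotLoop_mod (n : Nat) (d : String) (hd : d ∈ pvOrder) :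
    pvRotLoop n d = pvRotLoop (n % 4) d := by
  induction n using Nat.strong_induction_on with
  | _ n ih =>
    by_cases h : n < 4
    · rw [Nat.mod_eq_of_lt h]
    · have hn : n = (n - 4) + 4 := by omega
      rw [hn, pvRotLoop_period _ d hd, ih (n - 4) (by omega)]
      congr 1
      omega

-- ===== VERDICT (by name: the statement is the Claim_ definition above) =====

theorem xz_direction_y_rotated_spec : Claim_equal_xz_direction_y_rotated := by
  intro direction quarter_turns _ hpre
  unfold Spec_xz_direction_y_rotated xz_direction_y_rotated xz_direction_y_rotated_alt
  by_cases hq : quarter_turns ≤ 0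
  · have h0 : quarter_turns.toNat = 0 := by omega
    simp [h0, hq, pvRotLoop]
  · simp only [if_neg hq]
    have hd : direction ∈ pvOrder := by
      rcases hpre with h | h
      · omega
      · exact h
    obtain ⟨k, r, hrlt, hq'⟩ : ∃ k r : Nat, r < 4 ∧ quarter_turns = 4 * k + r :=
      ⟨quarter_turns.toNat / 4, quarter_turns.toNat % 4, by omega, by omega⟩
    rw [hq', PySem.Int.mod_eq_emod_of_pos (show (0:Int) < 4 by norm_num)]
    rw [show ((4 * (k:Int) + r).toNat) = 4 * k + r from by omega]
    rw [pvRotLoop_mod _ _ hd, show (4 * k + r) % 4 = r from by omega]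
    rw [show (pvIndex.getD direction 0 + (4 * (k:Int) + r)) % 4
          = (pvIndex.getD direction 0 + r) % 4 from by omega]
    fin_cases hd <;> interval_cases r <;> decide
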